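-- pv_equiv track=rewrite | github.com/ckdrjs96/algorithm | programmers/level1/체육복.py | solution
-- ===== SOURCE A (Python) =====
-- def solution(n, lost, reserve):
--     #여분으로 챙긴학생이 도난 당한경우 제거
--     lost = set(lost)
--     reserve = set(reserve)
--     inter = lost & reserve
--     lost = list(lost - inter)
--     reserve = list(reserve - inter)
--     cnt = n - len(lost)
--
--     lost.sort(reverse=True)
--     #앞학생 무조건 먼저 빌려주기
--     while lost:
--         student = lost.pop()
--         if student - 1 in reserve:
--             reserve.remove(student - 1)
--             cnt += 1
--         elif student + 1 in reserve:
--             reserve.remove(student + 1)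
--             cnt += 1
--     return cnt
-- ===== SOURCE B (Python) =====
-- def solution(n, lost, reserve):
--     # View the students as points on the integer line: L = needs a uniform,
--     # R = has a spare; a mutual theft cancels to neither. Maximum matching on
--     # this union of paths is found by one sweep over the sorted points,
--     # matching an adjacent opposite-type pair whenever one appears.
--     L = set(lost) - set(reserve)
--     R = set(reserve) - set(lost)
--     matched = 0
--     prev = None  # previous point still unmatched: (value, is_lost)
--     for v in sorted(L | R):
--         t = v in L
--         if prev is not None and prev[0] + 1 == v and prev[1] != t:
--             matched += 1
--             prev = None
--         else:
--             prev = (v, t)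
--     return n - len(L) + matched
-- ===== Notes on version B (the rewrite author's own statement) =====
-- stated objective: faster
-- what changed: Replaces A's greedy over the lost students (sort descending, pop, membership-test and list.remove on a shrinking reserve list) by a line-sweep maximum matching: students become tagged points on the integer line (needs / has-spare), and one pass over the sorted union matches any adjacent opposite-type pair on the fly; no per-student search and no mutable reserve pool.
import Mathlib
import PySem

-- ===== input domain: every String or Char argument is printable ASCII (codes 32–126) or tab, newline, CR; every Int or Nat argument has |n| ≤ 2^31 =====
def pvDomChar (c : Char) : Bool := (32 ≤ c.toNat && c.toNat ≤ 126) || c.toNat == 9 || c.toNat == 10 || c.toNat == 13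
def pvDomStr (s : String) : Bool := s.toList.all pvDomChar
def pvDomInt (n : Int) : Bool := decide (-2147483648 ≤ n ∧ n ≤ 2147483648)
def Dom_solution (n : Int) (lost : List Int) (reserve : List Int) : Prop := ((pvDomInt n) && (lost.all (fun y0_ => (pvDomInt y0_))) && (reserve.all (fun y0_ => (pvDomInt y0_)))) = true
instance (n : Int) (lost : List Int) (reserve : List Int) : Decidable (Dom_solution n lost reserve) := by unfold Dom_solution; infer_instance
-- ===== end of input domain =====

-- B replaces A's greedy (sort lost descending, pop, search-and-remove in the reserve list)
-- by a line-sweep matching: one pass over the sorted union of tagged points that matches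
-- any adjacent opposite-type pair on the fly (alternative algorithm, same exact result).

-- ===== PORT A =====
-- the while loop: lost is sorted descending and popped from the end; reserve.remove(v)
-- is PySem.List.remove? (the .getD res is unreachable: it runs only under the ∈ guard)
def aWhile (ls : List Int) (res : List Int) (cnt : Int) : Int :=
  if h : ls = [] then cnt
  else
    let student := ls.getLast h
    let rest := ls.dropLast
    if student - 1 ∈ res then aWhile rest ((PySem.List.remove? res (student - 1)).getD res) (cnt + 1)
    else if student + 1 ∈ res then aWhile rest ((PySem.List.remove? res (student + 1)).getD res) (cnt + 1)
    else aWhile rest res cnt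
termination_by ls.length
decreasing_by all_goals
  simp only [List.length_dropLast]
  exact Nat.sub_lt (List.length_pos_of_ne_nil h) Nat.one_pos

def solution (n : Int) (lost : List Int) (reserve : List Int) : Int :=
  let lostS : PySem.Set Int := PySem.Set.ofList lost
  let reserveS : PySem.Set Int := PySem.Set.ofList reserve
  let inter := PySem.Set.inter lostS reserveS
  -- list(set - set): downstream use (sort / membership / remove-by-value) is order-insensitive
  let lostL : List Int := PySem.Set.diff lostS inter
  let reserveL : List Int := PySem.Set.diff reserveS inter
  let cnt := n - (lostL.length : Int)
  aWhile (PySem.List.sorted lostL (fun x => x) true) reserveL cnt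

-- ===== PORT B =====
-- one step of the sweep: state = (matched count, previous still-unmatched point);
-- the tag of a point v is `v ∈ L` (True = needs a uniform, False = has a spare)
def bStep (L : List Int) : (Int × Option (Int × Bool)) → Int → (Int × Option (Int × Bool))
  | (c, none), v => (c, some (v, decide (v ∈ L)))
  | (c, some (pv, pt)), v =>
      if pv + 1 = v ∧ pt ≠ decide (v ∈ L) then (c + 1, none)
      else (c, some (v, decide (v ∈ L)))

def solution_alt (n : Int) (lost : List Int) (reserve : List Int) : Int :=
  let L : List Int := PySem.Set.diff (PySem.Set.ofList lost) (PySem.Set.ofList reserve)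
  let R : List Int := PySem.Set.diff (PySem.Set.ofList reserve) (PySem.Set.ofList lost)
  let matched :=
    ((PySem.List.sorted (PySem.Set.union L R) (fun x => x) false).foldl (bStep L)
      ((0 : Int), (none : Option (Int × Bool)))).1
  n - (L.length : Int) + matched

-- ===== PRECONDITION & SPEC =====
def Spec_solution (n : Int) (lost : List Int) (reserve : List Int) (out : Int) : Prop := out = solution_alt n lost reserve
instance (n : Int) (lost : List Int) (reserve : List Int) (out : Int) : Decidable (Spec_solution n lost reserve out) := by unfold Spec_solution; infer_instance

-- ===== CLAIM (what is proved, stated in full; the proofs are below) =====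
def Claim_equal_solution : Prop := ∀ (n : Int) (lost : List Int) (reserve : List Int), Dom_solution n lost reserve → Spec_solution n lost reserve (solution n lost reserve)

-- ===== LEMMAS AND PROOFS =====

-- abstract greedy matcher mirroring A's while loop: needy students ascending,
-- available spares as a duplicate-free list
def amatch : List Int → List Int → Int
  | [], _ => 0
  | s :: ls, r =>
    if s - 1 ∈ r then 1 + amatch ls (r.erase (s - 1))
    else if s + 1 ∈ r then 1 + amatch ls (r.erase (s + 1))
    else amatch ls r

-- abstract sweep mirroring B's fold over the tagged sorted points
def sweep : List (Int × Bool) → Option (Int × Bool) → Int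
  | [], _ => 0
  | (v, t) :: rest, none => sweep rest (some (v, t))
  | (v, t) :: rest, some (pv, pt) =>
      if pv + 1 = v ∧ pt ≠ t then 1 + sweep rest none else sweep rest (some (v, t))

def needy : List (Int × Bool) → List Int
  | [] => []
  | (v, true) :: rest => v :: needy rest
  | (_, false) :: rest => needy rest

def lenders : List (Int × Bool) → List Int
  | [] => []
  | (_, true) :: rest => lenders rest
  | (v, false) :: rest => v :: lenders rest

lemma amatch_perm (ls : List Int) : ∀ r1 r2 : List Int, r1.Perm r2 → amatch ls r1 = amatch ls r2 := by
  induction ls with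
  | nil => intro r1 r2 _; rfl
  | cons s t ih =>
    intro r1 r2 hp
    simp only [amatch]
    by_cases h1 : s - 1 ∈ r1
    · rw [if_pos h1, if_pos (hp.mem_iff.mp h1), ih _ _ (hp.erase _)]
    · rw [if_neg h1, if_neg (fun h => h1 (hp.mem_iff.mpr h))]
      by_cases h2 : s + 1 ∈ r1
      · rw [if_pos h2, if_pos (hp.mem_iff.mp h2), ih _ _ (hp.erase _)]
      · rw [if_neg h2, if_neg (fun h => h2 (hp.mem_iff.mpr h)), ih _ _ hp]

lemma aWhile_eq (ls : List Int) : ∀ res cnt, aWhile ls res cnt = cnt + amatch ls.reverse res := by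
  induction ls using List.reverseRecOn with
  | nil => intro res cnt; rw [aWhile]; simp [amatch]
  | append_singleton xs x ih =>
    intro res cnt
    have hne : xs ++ [x] ≠ [] := by simp
    have hlast : (xs ++ [x]).getLast hne = x := by
      rw [List.getLast_append_of_ne_nil]
      · rfl
      · simp
    rw [aWhile, dif_neg hne]
    simp only [hlast, List.dropLast_concat, List.reverse_append, List.reverse_cons,
      List.reverse_nil, List.nil_append, List.singleton_append, amatch]
    by_cases h1 : x - 1 ∈ res
    · rw [if_pos h1, if_pos h1, PySem.List.remove?_eq_some_erase res (x - 1) h1]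
      simp only [Option.getD_some]
      rw [ih]; omega
    · rw [if_neg h1, if_neg h1]
      by_cases h2 : x + 1 ∈ res
      · rw [if_pos h2, if_pos h2, PySem.List.remove?_eq_some_erase res (x + 1) h2]
        simp only [Option.getD_some]
        rw [ih]; omega
      · rw [if_neg h2, if_neg h2, ih]

lemma mem_needy (l : List (Int × Bool)) (a : Int) : a ∈ needy l ↔ (a, true) ∈ l := by
  induction l with
  | nil => simp [needy]
  | cons p rest ih =>
    obtain ⟨v, t⟩ := p
    cases t <;> simp [needy, ih, List.mem_cons]

lemma mem_lenders (l : List (Int × Bool)) (a : Int) : a ∈ lenders l ↔ (a, false) ∈ l := by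
  induction l with
  | nil => simp [lenders]
  | cons p rest ih =>
    obtain ⟨v, t⟩ := p
    cases t <;> simp [lenders, ih, List.mem_cons]

lemma needy_map (g : Int → Bool) (l : List Int) :
    needy (l.map (fun v => (v, g v))) = l.filter g := by
  induction l with
  | nil => rfl
  | cons v rest ih => cases hg : g v <;> simp [needy, hg, ih]

lemma lenders_map (g : Int → Bool) (l : List Int) :
    lenders (l.map (fun v => (v, g v))) = l.filter (fun v => !g v) := by
  induction l with
  | nil => rfl
  | cons v rest ih => cases hg : g v <;> simp [lenders, hg, ih]

lemma fold_sweep (L : List Int) : ∀ (vs : List Int) (c : Int) (prev : Option (Int × Bool)),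
    (vs.foldl (bStep L) (c, prev)).1 = c + sweep (vs.map (fun v => (v, decide (v ∈ L)))) prev := by
  intro vs
  induction vs with
  | nil => intro c prev; simp [sweep]
  | cons v rest ih =>
    intro c prev
    match prev with
    | none => simp only [List.foldl_cons, bStep, List.map_cons, sweep]; exact ih c _
    | some (pv, pt) =>
      simp only [List.foldl_cons, bStep, List.map_cons, sweep]
      by_cases h : pv + 1 = v ∧ pt ≠ decide (v ∈ L)
      · rw [if_pos h, if_pos h, ih]; omega
      · rw [if_neg h, if_neg h, ih]

-- an element whose neighbours nobody needs can be dropped from the reserve pool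
lemma amatch_cons_irrel (v : Int) : ∀ (l r : List Int), (∀ a ∈ l, a - 1 ≠ v ∧ a + 1 ≠ v) →
    amatch l (v :: r) = amatch l r := by
  intro l
  induction l with
  | nil => intro r _; rfl
  | cons s t ih =>
    intro r hn
    obtain ⟨h1, h2⟩ := hn s List.mem_cons_self
    have ht : ∀ a ∈ t, a - 1 ≠ v ∧ a + 1 ≠ v := fun a ha => hn a (List.mem_cons_of_mem _ ha)
    simp only [amatch, List.mem_cons, h1, false_or, h2]
    by_cases hm1 : s - 1 ∈ r
    · rw [if_pos hm1, if_pos hm1, List.erase_cons_tail (by simp [Ne.symm h1]), ih _ ht]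
    · rw [if_neg hm1, if_neg hm1]
      by_cases hm2 : s + 1 ∈ r
      · rw [if_pos hm2, if_pos hm2, List.erase_cons_tail (by simp [Ne.symm h2]), ih _ ht]
      · rw [if_neg hm2, if_neg hm2, ih _ ht]

-- core: on a strictly increasing tagged point list, the single sweep computes exactly
-- what A's ascending prefer-left greedy computes
lemma sweep_eq_amatch : ∀ (N : Nat) (pts : List (Int × Bool)), pts.length ≤ N →
    pts.Pairwise (fun a b => a.1 < b.1) →
    sweep pts none = amatch (needy pts) (lenders pts) := by
  intro N
  induction N with
  | zero =>
    intro pts hlen _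
    rw [List.length_eq_zero_iff.mp (Nat.le_zero.mp hlen)]
    rfl
  | succ N ih =>
    intro pts hlen hpw
    match pts with
    | [] => rfl
    | [(v, t)] => cases t <;> simp [sweep, needy, lenders, amatch]
    | (v, t) :: (w, u) :: rest =>
      have hvw : v < w := (List.pairwise_cons.mp hpw).1 (w, u) List.mem_cons_self
      have hrest_pw := (List.pairwise_cons.mp hpw).2
      have hwrest : ∀ x ∈ rest, w < x.1 := fun x hx => (List.pairwise_cons.mp hrest_pw).1 x hx
      have hrest_pw' := (List.pairwise_cons.mp hrest_pw).2
      have hlen2 : rest.length ≤ N := by simp at hlen; omega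
      have hlen1 : ((w, u) :: rest).length ≤ N := by simp at hlen ⊢; omega
      by_cases hadj : v + 1 = w ∧ t ≠ u
      · obtain ⟨hv1, htu⟩ := hadj
        have hsw : sweep ((v, t) :: (w, u) :: rest) none = 1 + sweep rest none := by
          simp only [sweep]
          rw [if_pos ⟨hv1, htu⟩]
        cases t
        · -- v has a spare, w = v+1 needs one: they match
          have hu : u = true := by revert htu; cases u <;> simp
          subst hu
          rw [hsw, ih rest hlen2 hrest_pw']
          show 1 + amatch (needy rest) (lenders rest)
            = amatch (needy ((v, false) :: (w, true) :: rest)) (lenders ((v, false) :: (w, true) :: rest))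
          simp only [needy, lenders]
          have hwm : w - 1 = v := by omega
          simp only [amatch, hwm, List.mem_cons, true_or, if_true, List.erase_cons_head]
        · -- v needs one, w = v+1 has a spare: they match
          have hu : u = false := by revert htu; cases u <;> simp
          subst hu
          rw [hsw, ih rest hlen2 hrest_pw']
          show 1 + amatch (needy rest) (lenders rest)
            = amatch (needy ((v, true) :: (w, false) :: rest)) (lenders ((v, true) :: (w, false) :: rest))
          simp only [needy, lenders]
          have hnm : v - 1 ∉ w :: lenders rest := by
            intro hm
            rcases List.mem_cons.mp hm with h | h
            · omega
            · have := hwrest _ ((mem_lenders rest _).mp h)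
              simp at this; omega
          have hmemw : v + 1 ∈ w :: lenders rest := by
            rw [hv1]; exact List.mem_cons_self
          have herase : (w :: lenders rest).erase (v + 1) = lenders rest := by
            rw [hv1]; exact List.erase_cons_head w _
          simp only [amatch]
          rw [if_neg hnm, if_pos hmemw, herase]
      · -- no adjacent opposite pair at the front: v is skipped by the sweep and is
        -- irrelevant to the matcher
        have hsw : sweep ((v, t) :: (w, u) :: rest) none = sweep ((w, u) :: rest) none := by
          simp only [sweep]
          rw [if_neg hadj]
        rw [hsw, ih _ hlen1 hrest_pw]
        cases t
        · -- v is a spare nobody adjacent needs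
          show amatch (needy ((w, u) :: rest)) (lenders ((w, u) :: rest))
            = amatch (needy ((v, false) :: (w, u) :: rest)) (lenders ((v, false) :: (w, u) :: rest))
          simp only [needy, lenders]
          rw [amatch_cons_irrel v _ _ ?_]
          intro a ha
          have ham := (mem_needy _ _).mp ha
          rcases List.mem_cons.mp ham with h | h
          · have h1 : a = w := congrArg Prod.fst h
            have h2 : u = true := (congrArg Prod.snd h).symm
            subst h1 h2
            constructor
            · intro hav; exact hadj ⟨by omega, by simp⟩
            · omega
          · have := hwrest _ h
            simp at this
            constructor <;> omega
        · -- v needs a uniform but no adjacent spare exists anywhere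
          show amatch (needy ((w, u) :: rest)) (lenders ((w, u) :: rest))
            = amatch (needy ((v, true) :: (w, u) :: rest)) (lenders ((v, true) :: (w, u) :: rest))
          simp only [needy, lenders]
          have hl1 : v - 1 ∉ lenders ((w, u) :: rest) := by
            intro hm
            have := (mem_lenders _ _).mp hm
            rcases List.mem_cons.mp this with h | h
            · have : v - 1 = w := congrArg Prod.fst h
              omega
            · have := hwrest _ h
              simp at this; omega
          have hl2 : v + 1 ∉ lenders ((w, u) :: rest) := by
            intro hm
            have := (mem_lenders _ _).mp hm
            rcases List.mem_cons.mp this with h | h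
            · have h1 : v + 1 = w := congrArg Prod.fst h
              have h2 : u = false := (congrArg Prod.snd h).symm
              exact hadj ⟨h1, by rw [h2]; simp⟩
            · have := hwrest _ h
              simp at this; omega
          conv_rhs => rw [amatch]
          rw [if_neg hl1, if_neg hl2]

-- ===== VERDICT (by name: the statement is the Claim_ definition above) =====
theorem solution_spec : Claim_equal_solution := by
  intro n lost reserve _
  unfold Spec_solution
  simp only [solution, solution_alt]
  set lostS : PySem.Set Int := PySem.Set.ofList lost with hlostS
  set reserveS : PySem.Set Int := PySem.Set.ofList reserve with hreserveS
  set inter : PySem.Set Int := PySem.Set.inter lostS reserveS with hinter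
  set lostL : List Int := PySem.Set.diff lostS inter with hlostL
  set reserveL : List Int := PySem.Set.diff reserveS inter with hreserveL
  set L : List Int := PySem.Set.diff lostS reserveS with hL
  set R : List Int := PySem.Set.diff reserveS lostS with hRdef
  set sortedU : List Int := PySem.List.sorted (PySem.Set.union L R) (fun x => x) false with hsortedU
  -- membership and nodup facts
  have memL : ∀ x : Int, x ∈ lostL ↔ x ∈ lost ∧ x ∉ reserve := by
    intro x
    simp only [hlostL, hinter, hlostS, hreserveS, PySem.Set.mem_diff, PySem.Set.mem_inter,
      PySem.Set.mem_ofList]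
    tauto
  have memR : ∀ x : Int, x ∈ reserveL ↔ x ∈ reserve ∧ x ∉ lost := by
    intro x
    simp only [hreserveL, hinter, hlostS, hreserveS, PySem.Set.mem_diff, PySem.Set.mem_inter,
      PySem.Set.mem_ofList]
    tauto
  have memLB : ∀ x : Int, x ∈ L ↔ x ∈ lost ∧ x ∉ reserve := by
    intro x
    simp only [hL, hlostS, hreserveS, PySem.Set.mem_diff, PySem.Set.mem_ofList]
  have memRB : ∀ x : Int, x ∈ R ↔ x ∈ reserve ∧ x ∉ lost := by
    intro x
    simp only [hRdef, hlostS, hreserveS, PySem.Set.mem_diff, PySem.Set.mem_ofList]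
  have ndL : lostL.Nodup := PySem.Set.nodup_diff _ _ (PySem.Set.nodup_ofList lost)
  have ndR : reserveL.Nodup := PySem.Set.nodup_diff _ _ (PySem.Set.nodup_ofList reserve)
  have ndLB : L.Nodup := PySem.Set.nodup_diff _ _ (PySem.Set.nodup_ofList lost)
  have hpermL : L.Perm lostL := by
    rw [List.perm_ext_iff_of_nodup ndLB ndL]
    intro a; rw [memLB, memL]
  -- the sorted union is strictly increasing
  have hndU : (PySem.Set.union L R : List Int).Nodup := PySem.Set.nodup_union _ _ ndLB
  have hndsU : sortedU.Nodup := ((PySem.List.sorted_perm _ _ _).nodup_iff).mpr hndU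
  have hpwU : sortedU.Pairwise (fun a b : Int => a < b) := by
    have h1 := PySem.List.sorted_pairwise (PySem.Set.union L R) (fun x : Int => x)
    exact (List.Pairwise.and h1 hndsU).imp (fun h => lt_of_le_of_ne h.1 h.2)
  have hmemU : ∀ x : Int, x ∈ sortedU ↔ x ∈ L ∨ x ∈ R := by
    intro x
    rw [hsortedU, PySem.List.mem_sorted, PySem.Set.mem_union]
  -- run B's fold as the abstract sweep over tagged points
  set pts : List (Int × Bool) := sortedU.map (fun v => (v, decide (v ∈ L))) with hpts
  have hfold : (sortedU.foldl (bStep L) ((0 : Int), (none : Option (Int × Bool)))).1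
      = sweep pts none := by
    rw [fold_sweep L sortedU 0 none, ← hpts]; omega
  have hpwpts : pts.Pairwise (fun a b : Int × Bool => a.1 < b.1) := by
    rw [hpts]
    exact List.pairwise_map.mpr hpwU
  have hmain := sweep_eq_amatch pts.length pts (le_refl _) hpwpts
  -- the needy points, ascending, are exactly sorted(lostL)
  have hneedy : needy pts = sortedU.filter (fun v => decide (v ∈ L)) := needy_map _ _
  have hlend : lenders pts = sortedU.filter (fun v => !decide (v ∈ L)) := lenders_map _ _
  have hndfilter : (sortedU.filter (fun v => decide (v ∈ L))).Nodup := hndsU.filter _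
  have hpermN : (sortedU.filter (fun v => decide (v ∈ L))).Perm lostL := by
    rw [List.perm_ext_iff_of_nodup hndfilter ndL]
    intro a
    simp only [List.mem_filter, decide_eq_true_eq, hmemU, memL, memLB, memRB]
    tauto
  have hpwN : (sortedU.filter (fun v => decide (v ∈ L))).Pairwise (fun a b : Int => a < b) :=
    hpwU.filter _
  have hsortL : PySem.List.sorted lostL (fun x : Int => x) false
      = sortedU.filter (fun v => decide (v ∈ L)) :=
    PySem.List.sorted_eq_of_perm_of_pairwise_lt _ _ _ hpermN hpwN
  -- the lender points are exactly A's cleaned-up reserve list, as a set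
  have hpermR : (sortedU.filter (fun v => !decide (v ∈ L))).Perm reserveL := by
    rw [List.perm_ext_iff_of_nodup (hndsU.filter _) ndR]
    intro a
    simp only [List.mem_filter, Bool.not_eq_eq_eq_not, Bool.not_true, decide_eq_false_iff_not,
      hmemU, memR, memLB, memRB]
    tauto
  -- descending sort is the reverse of the ascending one
  set asc : List Int := PySem.List.sorted lostL (fun x : Int => x) false with hasc
  have hascpw : asc.Pairwise (fun a b : Int => a < b) := by
    have h1 := PySem.List.sorted_pairwise lostL (fun x : Int => x)
    have h2 : asc.Nodup := ((PySem.List.sorted_perm lostL _ false).nodup_iff).mpr ndL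
    exact (List.Pairwise.and h1 h2).imp (fun h => lt_of_le_of_ne h.1 h.2)
  have hdesc : PySem.List.sorted lostL (fun x : Int => x) true = asc.reverse := by
    apply PySem.List.sorted_rev_eq_of_perm_of_pairwise_gt
    · exact asc.reverse_perm.trans (PySem.List.sorted_perm _ _ _)
    · exact List.pairwise_reverse.mpr hascpw
  rw [hdesc, aWhile_eq, List.reverse_reverse, hfold, hmain, hneedy, hlend,
    amatch_perm _ _ _ hpermR, ← hsortL, hpermL.length_eq]
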